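-- pv_equiv track=rewrite | github.com/fmcooper/codejam | saving-the-universe-again/saving-the-universe-again.py | swap_next_s
-- ===== SOURCE A (Python) =====
-- def swap_next_s(p):
--     for i in range(len(p) - 1, -1, -1):
--
--         # if we are on the first element then cannot swap
--         if i == 0:
--             return p, True
--
--         # if we can swap this element with the one before then do it
--         if p[i] == "S" and p[i - 1] == "C":
--             temp = p[i]
--             p[i] = p[i - 1]
--             p[i - 1] = temp
--             return p, False
--
--     return p, True
-- ===== SOURCE B (Python) =====
-- def swap_next_s(p):
--     # rebuild the list back-to-front: fold over reversed(p) with an accumulator;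
--     # the first C,S adjacency met (= the rightmost one) is emitted swapped
--     q = []          # output so far, stored reversed
--     prev = None     # element emitted just before x (i.e. to x's right in p)
--     done = False
--     for x in reversed(p):
--         if not done and x == "C" and prev == "S":
--             q[-1] = x
--             q.append(prev)
--             done = True
--         else:
--             q.append(x)
--         prev = x
--     q.reverse()
--     p[:] = q
--     return p, not done
-- ===== Notes on version B (the rewrite author's own statement) =====
-- stated objective: alternative
-- what changed: Replaces A's backward index scan with early returns and an in-place element swap by a single fold over reversed(p) that rebuilds the whole list back-to-front with an accumulator, emitting the first C,S adjacency it meets (the rightmost) swapped.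
import Mathlib
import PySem

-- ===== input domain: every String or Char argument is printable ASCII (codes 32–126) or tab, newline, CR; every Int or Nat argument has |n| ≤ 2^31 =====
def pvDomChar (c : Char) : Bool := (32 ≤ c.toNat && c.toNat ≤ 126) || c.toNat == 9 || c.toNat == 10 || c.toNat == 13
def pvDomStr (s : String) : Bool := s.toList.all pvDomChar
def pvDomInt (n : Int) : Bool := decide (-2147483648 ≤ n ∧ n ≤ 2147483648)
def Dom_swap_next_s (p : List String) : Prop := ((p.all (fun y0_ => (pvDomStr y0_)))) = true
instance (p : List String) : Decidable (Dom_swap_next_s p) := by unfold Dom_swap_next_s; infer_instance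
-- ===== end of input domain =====

-- B replaces A's backward index scan with early returns by a fold over reversed(p) that
-- rebuilds the list back-to-front with an accumulator, swapping the first ("C","S")
-- adjacency it meets, i.e. the rightmost one (alternative).
-- Both Pythons mutate p in place to the same final contents; equivalence here is about the
-- returned value.

-- ===== PORT A =====
-- backward loop 'for i in range(len(p)-1, -1, -1)': i = 0 returns (p, True); otherwise
-- test/swap at (i-1, i) and return, else continue with i-1.
def swapNextSLoopA (p : List String) : Nat → List String × Bool
  | 0 => (p, true)
  | i + 1 =>
    if p.getD (i + 1) "" = "S" ∧ p.getD i "" = "C" then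
      ((p.set (i + 1) (p.getD i "")).set i (p.getD (i + 1) ""), false)
    else swapNextSLoopA p i

def swap_next_s (p : List String) : List String × Bool :=
  if p.length = 0 then (p, true)        -- empty range: the loop body never runs
  else swapNextSLoopA p (p.length - 1)

-- ===== PORT B =====
-- loop body: one step of the fold over reversed(p); state = (q, prev, done)
def swapNextSAltStep (st : List String × Option String × Bool) (x : String) :
    List String × Option String × Bool :=
  if ¬st.2.2 ∧ x = "C" ∧ st.2.1 = some "S" then
    -- the guard gives st.2.1 = some "S", so .getD "" is exactly python's q.append(prev)
    (st.1.dropLast ++ [x, st.2.1.getD ""], some x, true)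
  else (st.1 ++ [x], some x, st.2.2)

def swap_next_s_alt (p : List String) : List String × Bool :=
  let st := p.reverse.foldl swapNextSAltStep ([], none, false)
  (st.1.reverse, !st.2.2)

-- ===== PRECONDITION & SPEC =====
def Spec_swap_next_s (p : List String) (out : List String × Bool) : Prop := out = swap_next_s_alt p
instance (p : List String) (out : List String × Bool) : Decidable (Spec_swap_next_s p out) := by unfold Spec_swap_next_s; infer_instance

-- ===== CLAIM (what is proved, stated in full; the proofs are below) =====
def Claim_equal_swap_next_s : Prop := ∀ (p : List String), Dom_swap_next_s p → Spec_swap_next_s p (swap_next_s p)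

-- ===== LEMMAS AND PROOFS =====

-- one-step unfolding equations (definitional)
theorem loopA_zero (p : List String) : swapNextSLoopA p 0 = (p, true) := rfl

theorem loopA_succ (p : List String) (i : Nat) :
    swapNextSLoopA p (i + 1) =
      (if p.getD (i + 1) "" = "S" ∧ p.getD i "" = "C" then
        ((p.set (i + 1) (p.getD i "")).set i (p.getD (i + 1) ""), false)
      else swapNextSLoopA p i) := rfl

-- proof-side structural recursion: both ports are related to this one function
def swapNextSGo : List String → List String × Bool
  | [] => ([], false)
  | [x] => ([x], false)
  | x :: y :: rest =>
    let r := swapNextSGo (y :: rest)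
    if r.2 then (x :: r.1, true)
    else if x = "C" ∧ y = "S" then (y :: x :: rest, true)
    else (x :: y :: rest, false)

theorem go_cons2 (x y : String) (rest : List String) :
    swapNextSGo (x :: y :: rest) =
      (let r := swapNextSGo (y :: rest)
       if r.2 then (x :: r.1, true)
       else if x = "C" ∧ y = "S" then (y :: x :: rest, true)
       else (x :: y :: rest, false)) := rfl

theorem go_id_of_false (t : List String) (h : (swapNextSGo t).2 = false) :
    (swapNextSGo t).1 = t := by
  induction t with
  | nil => rfl
  | cons x t' ih =>
    cases t' with
    | nil => rfl
    | cons y rest =>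
      rw [go_cons2] at h ⊢
      cases hd : (swapNextSGo (y :: rest)).2 with
      | true => simp [hd] at h
      | false =>
        by_cases hp : x = "C" ∧ y = "S"
        · obtain ⟨hx, hy⟩ := hp
          subst hx; subst hy
          simp [hd] at h
        · simp [hd, hp]

-- Shift lemma: A's backward scan over x :: t at indices k+2 … 1 factors through the scan over t
-- at indices k+1 … 1 (same pairs, shifted by one), falling back to the step at index 1.
theorem loopA_shift (x : String) (t : List String) (k : Nat) :
    swapNextSLoopA (x :: t) (k + 2) =
      (let r := swapNextSLoopA t (k + 1)
       if r.2 then swapNextSLoopA (x :: t) 1 else (x :: r.1, false)) := by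
  induction k with
  | zero =>
    rw [show (0 + 2 : Nat) = 1 + 1 from rfl, loopA_succ (x :: t) 1, loopA_succ t 0]
    simp only [List.getD_cons_succ, List.set_cons_succ, loopA_zero]
    by_cases hc : t[1]?.getD "" = "S" ∧ t[0]?.getD "" = "C"
    · simp [hc]
    · simp [hc]
  | succ k ih =>
    rw [show (k + 1 + 2 : Nat) = (k + 2) + 1 from rfl, loopA_succ (x :: t) (k + 2),
      show (k + 1 + 1 : Nat) = (k + 1) + 1 from rfl, loopA_succ t (k + 1)]
    simp only [List.getD_cons_succ, List.set_cons_succ, show k + 1 + 1 = k + 2 from rfl]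
    by_cases hc : t.getD (k + 2) "" = "S" ∧ t.getD (k + 1) "" = "C"
    · rw [if_pos hc, if_pos hc]
      simp
    · rw [if_neg hc, if_neg hc]
      exact ih

-- A's full loop equals B's recursion (with the Bool negated).
theorem loopA_eq_go (p : List String) :
    swapNextSLoopA p (p.length - 1) = ((swapNextSGo p).1, !(swapNextSGo p).2) := by
  induction p with
  | nil => simp [swapNextSLoopA, swapNextSGo]
  | cons x t ih =>
    cases t with
    | nil => simp [swapNextSLoopA, swapNextSGo]
    | cons y rest =>
      cases rest with
      | nil =>
        -- length 2: one real loop step at i = 1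
        show swapNextSLoopA [x, y] (0 + 1) = _
        rw [loopA_succ [x, y] 0, go_cons2]
        simp only [List.getD_cons_succ, List.getD_cons_zero, List.set_cons_succ,
          List.set_cons_zero, loopA_zero]
        by_cases h : x = "C" ∧ y = "S"
        · simp [swapNextSGo, h.1, h.2]
        · have h' : ¬ (y = "S" ∧ x = "C") := fun hc => h ⟨hc.2, hc.1⟩
          simp [swapNextSGo, if_neg h, if_neg h']
      | cons z rest' =>
        have hlen : (x :: y :: z :: rest').length - 1 = rest'.length + 2 := by simp
        have hlen' : (y :: z :: rest').length - 1 = rest'.length + 1 := by simp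
        rw [hlen, loopA_shift]
        rw [hlen'] at ih
        rw [ih]
        conv_rhs => rw [go_cons2]
        cases hd : (swapNextSGo (y :: z :: rest')).2 with
        | true =>
          -- inner recursion found a pair: outer just prepends x
          simp [hd]
        | false =>
          -- no pair in the tail: the step at index 1 decides
          simp only [hd, Bool.not_false, Bool.false_eq_true, if_false]
          rw [show (1 : Nat) = 0 + 1 from rfl, loopA_succ (x :: y :: z :: rest') 0]
          simp only [List.getD_cons_succ, List.getD_cons_zero, List.set_cons_succ,
            List.set_cons_zero, loopA_zero]
          by_cases h : x = "C" ∧ y = "S"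
          · simp [h.1, h.2]
          · have h' : ¬ (y = "S" ∧ x = "C") := fun hc => h ⟨hc.2, hc.1⟩
            simp [if_neg h, if_neg h']


-- B's fold over reversed(p) computes swapNextSGo (reversed output, head as prev, same flag)
theorem foldr_go (t : List String) :
    t.foldr (fun x st => swapNextSAltStep st x) ([], none, false) =
      ((swapNextSGo t).1.reverse, t.head?, (swapNextSGo t).2) := by
  induction t with
  | nil => rfl
  | cons x t' ih =>
    cases t' with
    | nil => simp [swapNextSAltStep, swapNextSGo]
    | cons y rest =>
      rw [List.foldr_cons, ih, go_cons2]
      cases hd : (swapNextSGo (y :: rest)).2 with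
      | true => simp [swapNextSAltStep, hd]
      | false =>
        have h1 : (swapNextSGo (y :: rest)).1 = y :: rest := go_id_of_false _ hd
        by_cases h : x = "C" ∧ y = "S"
        · obtain ⟨hx, hy⟩ := h
          subst hx; subst hy
          simp [swapNextSAltStep, hd, h1]
        · simp [swapNextSAltStep, hd, h1, h]

theorem alt_eq_go (p : List String) :
    swap_next_s_alt p = ((swapNextSGo p).1, !(swapNextSGo p).2) := by
  unfold swap_next_s_alt
  rw [List.foldl_reverse, foldr_go]
  simp

-- ===== VERDICT (by name: the statement is the Claim_ definition above) =====
theorem swap_next_s_spec : Claim_equal_swap_next_s := by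
  intro p _
  unfold Spec_swap_next_s swap_next_s
  rw [alt_eq_go]
  by_cases hlen : p.length = 0
  · rw [if_pos hlen]
    rw [List.length_eq_zero_iff] at hlen
    subst hlen
    simp [swapNextSGo]
  · rw [if_neg hlen]
    exact loopA_eq_go p
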